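-- pv_equiv track=rewrite | github.com/pkemkes/advent-of-code | 2024/06/solution.py | calc_path_len
-- ===== SOURCE A (Python) =====
-- def get_guard_pos(route_map: list[str], len_x: int, len_y: int) -> tuple[int, int]:
--     for x in range(len_x):
--         for y in range(len_y):
--             if route_map[y][x] == "^":
--                 return (x, y)
--     return None
--
-- def is_in_map(pos: tuple[int, int], len_x: int, len_y: int) -> bool:
--     x, y = pos
--     return x >= 0 and y >= 0 and x < len_x and y < len_y
--
-- def get_field_value(
--         pos: tuple[int, int], route_map: list[str], len_x: int, len_y: int,
--     ) -> str:
--         if not is_in_map(pos, len_x, len_y):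
--             return "."
--         x, y = pos
--         return route_map[y][x]
--
-- def get_next_pos(
--         pos: tuple[int, int], directions: list[tuple[int, int]], current_dir: int
--     ) -> tuple[int, int]:
--     x, y = pos
--     add_x, add_y = directions[current_dir]
--     return x + add_x, y + add_y
--
-- def is_obstacle(pos: tuple[int, int], route_map: list[str], len_x: int, len_y: int) -> bool:
--     return get_field_value(pos, route_map, len_x, len_y) == "#"
--
-- def calc_path_len(route_map: list[str], len_x: int, len_y: int) -> tuple[int, bool]:
--     directions = [(0, -1), (1, 0), (0, 1), (-1, 0)]
--
--     guard_pos = get_guard_pos(route_map, len_x, len_y)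
--     guard_positions = set()
--     current_dir = 0
--     looped = False
--     while is_in_map(guard_pos, len_x, len_y):
--         guard_positions.add((guard_pos, current_dir))
--         while True:
--             next_pos = get_next_pos(guard_pos, directions, current_dir)
--             if not is_obstacle(next_pos, route_map, len_x, len_y):
--                 break
--             current_dir = (current_dir + 1) % len(directions)
--         guard_pos = next_pos
--         if (guard_pos, current_dir) in guard_positions:
--             looped = True
--             break
--     distinct_guard_positions = set(pos for pos, _ in guard_positions)
--
--     return len(distinct_guard_positions), looped
-- ===== SOURCE B (Python) =====
-- def calc_path_len(route_map: list[str], len_x: int, len_y: int) -> tuple[int, bool]: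
--     moves = ((0, -1), (1, 0), (0, 1), (-1, 0))
--     x, y = next((x, y) for x in range(len_x) for y in range(len_y)
--                 if route_map[y][x] == "^")
--
--     def cell(cx, cy):
--         if 0 <= cx < len_x and 0 <= cy < len_y:
--             return route_map[cy][cx]
--         return "."
--
--     d = 0
--     seen = {(x, y)}
--     # Pigeonhole: there are at most 4*len_x*len_y distinct (position, direction)
--     # states, so a walk that is still on the map after that many steps must loop.
--     budget = 4 * len_x * len_y
--     while budget > 0:
--         for _ in range(4):
--             if cell(x + moves[d][0], y + moves[d][1]) != "#":
--                 break
--             d = (d + 1) % 4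
--         x += moves[d][0]
--         y += moves[d][1]
--         if not (0 <= x < len_x and 0 <= y < len_y):
--             return len(seen), False
--         seen.add((x, y))
--         budget -= 1
--     return len(seen), True
-- ===== Notes on version B (the rewrite author's own statement) =====
-- stated objective: alternative
-- what changed: B drops A's visited-(position,direction) set and its per-step membership test: it walks the same route but detects looping by pigeonhole — if the guard is still on the map after 4*len_x*len_y in-map steps every state must have repeated — maintaining only the set of visited positions and a countdown counter.
-- outside the precondition, e.g. on calc_path_len(['ab', 'cd', 'e^', 'f'], 2, 4): A returns (3, False), B returns (3, False)
import Mathlib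
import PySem

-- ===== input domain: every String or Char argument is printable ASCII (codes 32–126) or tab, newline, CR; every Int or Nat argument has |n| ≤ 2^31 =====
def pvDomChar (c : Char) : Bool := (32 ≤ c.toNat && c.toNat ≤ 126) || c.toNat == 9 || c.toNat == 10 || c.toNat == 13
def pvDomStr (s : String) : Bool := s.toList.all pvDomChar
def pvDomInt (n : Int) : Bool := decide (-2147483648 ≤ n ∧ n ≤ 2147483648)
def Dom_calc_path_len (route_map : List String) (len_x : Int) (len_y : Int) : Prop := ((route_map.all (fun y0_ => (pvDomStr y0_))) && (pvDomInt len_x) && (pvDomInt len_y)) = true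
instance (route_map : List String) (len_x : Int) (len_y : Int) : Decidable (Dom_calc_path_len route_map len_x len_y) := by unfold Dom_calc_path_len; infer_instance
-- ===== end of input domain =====

-- B replaces A's visited-(position,direction) set and its membership test by a plain
-- step counter: after 4*len_x*len_y in-map steps every state must have repeated, so the
-- walk is a loop; B only maintains the set of visited positions.  Objective: alternative.

-- ===== PORT A =====
-- Python list `directions`
def pvDirectionsA : List (Int × Int) := [(0, -1), (1, 0), (0, 1), (-1, 0)]

-- get_guard_pos: the nested `for x in range(len_x): for y in range(len_y)` with early
-- return, as counting recursion (no range list is materialised, like Python's range).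
-- route_map[y][x]: `.getD` is unreachable where Python would raise IndexError (excluded by Pre_).
def pvScanYA (route_map : List String) (x : Int) : Nat → Int → Option (Int × Int)
  | 0, _ => none
  | f + 1, y =>
    if ((PySem.List.pyGet? route_map y).bind (fun r => PySem.Str.pyGet? r x)) = some '^' then
      some (x, y)
    else pvScanYA route_map x f (y + 1)

def pvScanXA (route_map : List String) (len_y : Int) : Nat → Int → Option (Int × Int)
  | 0, _ => none
  | f + 1, x =>
    match pvScanYA route_map x len_y.toNat 0 with
    | some g => some g
    | none => pvScanXA route_map len_y f (x + 1)

def pvGetGuardPosA (route_map : List String) (len_x len_y : Int) : Option (Int × Int) :=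
  pvScanXA route_map len_y len_x.toNat 0

def pvIsInMapA (pos : Int × Int) (len_x len_y : Int) : Bool :=
  decide (pos.1 ≥ 0) && decide (pos.2 ≥ 0) && decide (pos.1 < len_x) && decide (pos.2 < len_y)

-- get_field_value (the `.getD '.'` on the lookup is unreachable under Pre_: in-map cells are indexable)
def pvGetFieldValueA (pos : Int × Int) (route_map : List String) (len_x len_y : Int) : Char :=
  if !pvIsInMapA pos len_x len_y then '.'
  else ((PySem.List.pyGet? route_map pos.2).bind (fun r => PySem.Str.pyGet? r pos.1)).getD '.'

def pvGetNextPosA (pos : Int × Int) (directions : List (Int × Int)) (current_dir : Int) : Int × Int :=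
  let d := (PySem.List.pyGet? directions current_dir).getD (0, 0)
  (pos.1 + d.1, pos.2 + d.2)

def pvIsObstacleA (pos : Int × Int) (route_map : List String) (len_x len_y : Int) : Bool :=
  pvGetFieldValueA pos route_map len_x len_y == '#'

-- the inner `while True` turning loop; Python terminates iff some of the 4 directions is
-- free (otherwise it diverges — those inputs are outside Pre_), so fuel 4 is exact there.
def pvTurnA (route_map : List String) (len_x len_y : Int) (pos : Int × Int) :
    Nat → Int → Int
  | 0, d => d
  | f + 1, d =>
    if pvIsObstacleA (pvGetNextPosA pos pvDirectionsA d) route_map len_x len_y then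
      pvTurnA route_map len_x len_y pos f (PySem.Int.mod (d + 1) 4)
    else d

def pvCountA (states : PySem.Set ((Int × Int) × Int)) : Int :=
  ((PySem.Set.ofList (states.map Prod.fst)).length : Int)

-- the outer `while is_in_map(...)` loop, with fuel; on every input admitted by Pre_ the
-- Python loop runs fewer than 4*len_x*len_y+2 iterations (pigeonhole, proved below), so
-- the fuel-exhausted branch is unreachable there.
def pvLoopA (route_map : List String) (len_x len_y : Int) :
    Nat → PySem.Set ((Int × Int) × Int) → (Int × Int) → Int → Int × Bool
  | 0, states, _, _ => (pvCountA states, true)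
  | f + 1, states, guard_pos, current_dir =>
    if pvIsInMapA guard_pos len_x len_y then
      let states' := PySem.Set.add states (guard_pos, current_dir)
      let d' := pvTurnA route_map len_x len_y guard_pos 4 current_dir
      let next_pos := pvGetNextPosA guard_pos pvDirectionsA d'
      if PySem.Set.contains states' (next_pos, d') then (pvCountA states', true)
      else pvLoopA route_map len_x len_y f states' next_pos d'
    else (pvCountA states, false)

-- guard_pos = None (no '^' found) makes Python raise TypeError; excluded by Pre_.
def calc_path_len (route_map : List String) (len_x : Int) (len_y : Int) : Int × Bool :=
  match pvGetGuardPosA route_map len_x len_y with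
  | none => (0, false)
  | some g => pvLoopA route_map len_x len_y ((4 * len_x * len_y).toNat + 2) PySem.Set.empty g 0

-- ===== PORT B =====
def pvMovesB : List (Int × Int) := [(0, -1), (1, 0), (0, 1), (-1, 0)]

-- next((x, y) for x in range(len_x) for y in range(len_y) if route_map[y][x] == "^"):
-- the generator is a lazy nested scan, ported as the same counting recursion
-- (StopIteration when there is no '^' — excluded by Pre_, modeled as none)
def pvScanYB (route_map : List String) (x : Int) : Nat → Int → Option (Int × Int)
  | 0, _ => none
  | f + 1, y =>
    if ((PySem.List.pyGet? route_map y).bind (fun r => PySem.Str.pyGet? r x)) = some '^' then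
      some (x, y)
    else pvScanYB route_map x f (y + 1)

def pvScanXB (route_map : List String) (len_y : Int) : Nat → Int → Option (Int × Int)
  | 0, _ => none
  | f + 1, x =>
    match pvScanYB route_map x len_y.toNat 0 with
    | some g => some g
    | none => pvScanXB route_map len_y f (x + 1)

def pvFindGuardB (route_map : List String) (len_x len_y : Int) : Option (Int × Int) :=
  pvScanXB route_map len_y len_x.toNat 0

def pvCellB (route_map : List String) (len_x len_y : Int) (cx cy : Int) : Char :=
  if 0 ≤ cx ∧ cx < len_x ∧ 0 ≤ cy ∧ cy < len_y then
    ((PySem.List.pyGet? route_map cy).bind (fun r => PySem.Str.pyGet? r cx)).getD '.'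
  else '.'

def pvMoveB (d : Int) : Int × Int := (PySem.List.pyGet? pvMovesB d).getD (0, 0)

-- `for _ in range(4): if cell(...) != "#": break; d = (d + 1) % 4`
def pvTurnB (route_map : List String) (len_x len_y : Int) (x y : Int) : Nat → Int → Int
  | 0, d => d
  | f + 1, d =>
    if pvCellB route_map len_x len_y (x + (pvMoveB d).1) (y + (pvMoveB d).2) ≠ '#' then d
    else pvTurnB route_map len_x len_y x y f (PySem.Int.mod (d + 1) 4)

-- `while budget > 0` with budget = 4*len_x*len_y counting down
def pvLoopB (route_map : List String) (len_x len_y : Int) :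
    Nat → PySem.Set (Int × Int) → (Int × Int) → Int → Int × Bool
  | 0, seen, _, _ => ((seen.length : Int), true)
  | budget + 1, seen, pos, d =>
    let d' := pvTurnB route_map len_x len_y pos.1 pos.2 4 d
    let nx := pos.1 + (pvMoveB d').1
    let ny := pos.2 + (pvMoveB d').2
    if 0 ≤ nx ∧ nx < len_x ∧ 0 ≤ ny ∧ ny < len_y then
      pvLoopB route_map len_x len_y budget (PySem.Set.add seen (nx, ny)) (nx, ny) d'
    else ((seen.length : Int), false)

def calc_path_len_alt (route_map : List String) (len_x : Int) (len_y : Int) : Int × Bool :=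
  match pvFindGuardB route_map len_x len_y with
  | none => (0, false)
  | some g =>
    pvLoopB route_map len_x len_y (4 * len_x * len_y).toNat
      (PySem.Set.add PySem.Set.empty g) g 0

-- ===== PRECONDITION & SPEC =====
-- cell accessor used only by Pre_ (total; all uses are at in-window coordinates)
def pvAt (route_map : List String) (x y : Int) : Char :=
  ((route_map.getD y.toNat "").toList.getD x.toNat ' ')

-- the '^' cells of the len_x × len_y window, read off the map text (used only by Pre_;
-- cheap to decide for any len_x/len_y because it only walks the actual strings)
def pvGuardsPre (route_map : List String) (len_x len_y : Int) : List (Int × Int) :=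
  (route_map.take len_y.toNat).zipIdx.flatMap fun ry =>
    (ry.1.toList.take len_x.toNat).zipIdx.filterMap fun cx =>
      if cx.1 = '^' then some ((cx.2 : Int), (ry.2 : Int)) else none

-- Pre_ admits two regions on which Python A provably returns: (W) the whole len_x × len_y
-- window is indexable, it contains a '^', and the first-found guard is not fenced in by
-- '#' on all four sides (A would loop forever there); (P2) the first '^' of column 0 comes
-- before any '#' in that column and before row len_y, with no missing cell above it, so the
-- scan finds it and the guard walks straight off the top edge.  Pre_ therefore excludes
-- inputs where A raises (IndexError on a missing cell, TypeError unpacking None when there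
-- is no guard, B's next() raising StopIteration) or diverges (fenced-in guard), and also
-- some ragged maps outside (W)/(P2) on which A happens to return because neither the scan
-- nor the walk reaches a missing cell.
def Pre_calc_path_len (route_map : List String) (len_x : Int) (len_y : Int) : Prop :=
  (len_y ≤ (route_map.length : Int) ∧
   (∀ s ∈ route_map.take len_y.toNat, len_x ≤ (s.toList.length : Int)) ∧
   (∃ g ∈ pvGuardsPre route_map len_x len_y,
     (∀ p ∈ pvGuardsPre route_map len_x len_y, g.1 < p.1 ∨ (g.1 = p.1 ∧ g.2 ≤ p.2)) ∧
     ¬ (∀ m ∈ ([(0, -1), (1, 0), (0, 1), (-1, 0)] : List (Int × Int)),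
         (0 ≤ g.1 + m.1 ∧ g.1 + m.1 < len_x ∧ 0 ≤ g.2 + m.2 ∧ g.2 + m.2 < len_y) ∧
         pvAt route_map (g.1 + m.1) (g.2 + m.2) = '#')))
  ∨
  (0 < len_x ∧
   ∃ n ∈ List.range route_map.length, (n : Int) < len_y ∧
     (∀ y ∈ List.range (n + 1), 1 ≤ (route_map.getD y "").toList.length) ∧
     pvAt route_map 0 (n : Int) = '^' ∧
     (∀ y ∈ List.range n, pvAt route_map 0 (y : Int) ≠ '^' ∧ pvAt route_map 0 (y : Int) ≠ '#'))

instance (route_map : List String) (len_x : Int) (len_y : Int) : Decidable (Pre_calc_path_len route_map len_x len_y) := by unfold Pre_calc_path_len; infer_instance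

def pvWitness_calc_path_len : List String × Int × Int := (["^."], 2, 1)

def Spec_calc_path_len (route_map : List String) (len_x : Int) (len_y : Int) (out : Int × Bool) : Prop := out = calc_path_len_alt route_map len_x len_y
instance (route_map : List String) (len_x : Int) (len_y : Int) (out : Int × Bool) : Decidable (Spec_calc_path_len route_map len_x len_y out) := by unfold Spec_calc_path_len; infer_instance

-- ===== CLAIM (what is proved, stated in full; the proofs are below) =====
def Claim_equal_calc_path_len : Prop := ∀ (route_map : List String) (len_x : Int) (len_y : Int), Dom_calc_path_len route_map len_x len_y → Pre_calc_path_len route_map len_x len_y → Spec_calc_path_len route_map len_x len_y (calc_path_len route_map len_x len_y)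

-- ===== LEMMAS AND PROOFS =====

-- proof-side abbreviations (used only by the lemmas below)
abbrev pvInM (len_x len_y : Int) (p : Int × Int) : Prop :=
  0 ≤ p.1 ∧ p.1 < len_x ∧ 0 ≤ p.2 ∧ p.2 < len_y

def pvStep (route_map : List String) (len_x len_y : Int) (s : (Int × Int) × Int) : (Int × Int) × Int :=
  let d' := pvTurnA route_map len_x len_y s.1 4 s.2
  (pvGetNextPosA s.1 pvDirectionsA d', d')

theorem pvScanY_eq (route_map : List String) (x : Int) :
    ∀ (f : Nat) (y : Int), pvScanYA route_map x f y = pvScanYB route_map x f y := by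
  intro f
  induction f with
  | zero => intro y; rfl
  | succ f ih =>
    intro y
    unfold pvScanYA pvScanYB
    split
    · rfl
    · exact ih (y + 1)

theorem pvGuard_eq (route_map : List String) (len_x len_y : Int) :
    pvGetGuardPosA route_map len_x len_y = pvFindGuardB route_map len_x len_y := by
  unfold pvGetGuardPosA pvFindGuardB
  generalize (0 : Int) = x0
  induction len_x.toNat generalizing x0 with
  | zero => rfl
  | succ f ih =>
    unfold pvScanXA pvScanXB
    rw [pvScanY_eq]
    cases pvScanYB route_map x0 len_y.toNat 0 with
    | some g => rfl
    | none => exact ih (x0 + 1)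

theorem pvIsInMapA_eq (pos : Int × Int) (len_x len_y : Int) :
    pvIsInMapA pos len_x len_y = true ↔ pvInM len_x len_y pos := by
  unfold pvIsInMapA pvInM
  simp only [Bool.and_eq_true, decide_eq_true_eq, ge_iff_le, and_assoc]
  tauto

theorem pvCell_eq (route_map : List String) (len_x len_y : Int) (pos : Int × Int) :
    pvGetFieldValueA pos route_map len_x len_y = pvCellB route_map len_x len_y pos.1 pos.2 := by
  unfold pvGetFieldValueA pvCellB
  by_cases h : 0 ≤ pos.1 ∧ pos.1 < len_x ∧ 0 ≤ pos.2 ∧ pos.2 < len_y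
  · have hb : pvIsInMapA pos len_x len_y = true := (pvIsInMapA_eq pos len_x len_y).mpr h
    rw [if_pos h, hb]
    simp
  · have hb : pvIsInMapA pos len_x len_y = false := by
      cases hx : pvIsInMapA pos len_x len_y
      · rfl
      · exact absurd ((pvIsInMapA_eq pos len_x len_y).mp hx) h
    rw [if_neg h, hb]
    simp

theorem pvMove_eq (d : Int) :
    (PySem.List.pyGet? pvDirectionsA d).getD (0, 0) = pvMoveB d := by
  unfold pvMoveB pvMovesB pvDirectionsA
  rfl

theorem pvTurn_eq (route_map : List String) (len_x len_y : Int) (pos : Int × Int) :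
    ∀ (f : Nat) (d : Int),
      pvTurnA route_map len_x len_y pos f d = pvTurnB route_map len_x len_y pos.1 pos.2 f d := by
  intro f
  induction f with
  | zero => intro d; rfl
  | succ f ih =>
    intro d
    unfold pvTurnA pvTurnB
    have hc : pvIsObstacleA (pvGetNextPosA pos pvDirectionsA d) route_map len_x len_y =
        (pvCellB route_map len_x len_y (pos.1 + (pvMoveB d).1) (pos.2 + (pvMoveB d).2) == '#') := by
      unfold pvIsObstacleA
      rw [pvCell_eq]
      unfold pvGetNextPosA
      rw [pvMove_eq]
    rw [hc]
    by_cases hob : pvCellB route_map len_x len_y (pos.1 + (pvMoveB d).1) (pos.2 + (pvMoveB d).2) = '#'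
    · simp [hob, ih]
    · simp [hob]

theorem pvDirRange (route_map : List String) (len_x len_y : Int) (pos : Int × Int) :
    ∀ (f : Nat) (d : Int), 0 ≤ d → d < 4 →
      0 ≤ pvTurnA route_map len_x len_y pos f d ∧ pvTurnA route_map len_x len_y pos f d < 4 := by
  intro f
  induction f with
  | zero => intro d h1 h2; exact ⟨h1, h2⟩
  | succ f ih =>
    intro d h1 h2
    unfold pvTurnA
    split
    · exact ih _ (PySem.Int.mod_nonneg _ (by norm_num)) (PySem.Int.mod_lt _ (by norm_num))
    · exact ⟨h1, h2⟩

-- B's one loop iteration, phrased with pvStep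
theorem pvLoopB_succ (route_map : List String) (len_x len_y : Int)
    (b : Nat) (seen : PySem.Set (Int × Int)) (s : (Int × Int) × Int) :
    pvLoopB route_map len_x len_y (b + 1) seen s.1 s.2 =
      (if pvInM len_x len_y (pvStep route_map len_x len_y s).1 then
        pvLoopB route_map len_x len_y b (PySem.Set.add seen (pvStep route_map len_x len_y s).1)
          (pvStep route_map len_x len_y s).1 (pvStep route_map len_x len_y s).2
      else ((seen.length : Int), false)) := by
  simp only [pvLoopB, pvStep, pvGetNextPosA, pvMove_eq, ← pvTurn_eq]

-- two Nodup lists with the same members have the same length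
theorem pv_length_eq_of_mem_iff {α : Type} [DecidableEq α] {l₁ l₂ : List α}
    (h₁ : l₁.Nodup) (h₂ : l₂.Nodup) (h : ∀ a, a ∈ l₁ ↔ a ∈ l₂) : l₁.length = l₂.length :=
  ((List.perm_ext_iff_of_nodup h₁ h₂).mpr h).length_eq

theorem pvCountA_eq (states : PySem.Set ((Int × Int) × Int)) (seen : PySem.Set (Int × Int))
    (hs : seen.Nodup) (h : ∀ p, p ∈ seen ↔ ∃ s ∈ states, s.1 = p) :
    pvCountA states = (seen.length : Int) := by
  unfold pvCountA
  congr 1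
  apply pv_length_eq_of_mem_iff (PySem.Set.nodup_ofList _) hs
  intro p
  rw [PySem.Set.mem_ofList, h, List.mem_map]

-- pigeonhole: a Nodup list of in-map states has length ≤ 4*len_x*len_y
theorem pvPigeon (len_x len_y : Int) (l : List ((Int × Int) × Int))
    (hnd : l.Nodup)
    (h : ∀ s ∈ l, pvInM len_x len_y s.1 ∧ 0 ≤ s.2 ∧ s.2 < 4) :
    l.length ≤ (4 * len_x * len_y).toNat := by
  classical
  set e : (Int × Int) × Int → Int := fun s => (s.1.2 * len_x + s.1.1) * 4 + s.2 with he
  have hmaps : (l.map e).Nodup := by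
    refine List.Nodup.map_on ?_ hnd
    intro s hs t ht hst
    obtain ⟨⟨hx0, hx1, hy0, hy1⟩, hd0, hd1⟩ := h s hs
    obtain ⟨⟨gx0, gx1, gy0, gy1⟩, gd0, gd1⟩ := h t ht
    have hk : s.1.2 * len_x + s.1.1 = t.1.2 * len_x + t.1.1 ∧ s.2 = t.2 := by
      simp only [he] at hst
      revert hst
      generalize s.1.2 * len_x + s.1.1 = a
      generalize t.1.2 * len_x + t.1.1 = b
      intro hst
      omega
    have hyy : s.1.2 = t.1.2 := by
      by_contra hne
      rcases lt_or_gt_of_ne hne with hlt | hlt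
      · have : s.1.2 * len_x + len_x ≤ t.1.2 * len_x := by
          have := mul_le_mul_of_nonneg_right (show s.1.2 + 1 ≤ t.1.2 by omega) (show (0:Int) ≤ len_x by omega)
          nlinarith
        nlinarith [hk.1]
      · have : t.1.2 * len_x + len_x ≤ s.1.2 * len_x := by
          have := mul_le_mul_of_nonneg_right (show t.1.2 + 1 ≤ s.1.2 by omega) (show (0:Int) ≤ len_x by omega)
          nlinarith
        nlinarith [hk.1]
    have hxx : s.1.1 = t.1.1 := by
      have := hk.1; rw [hyy] at this; omega
    rw [Prod.ext_iff, Prod.ext_iff]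
    exact ⟨⟨hxx, hyy⟩, hk.2⟩
  have hbound : ∀ v ∈ l.map e, v ∈ Finset.Ico (0 : Int) (4 * len_x * len_y) := by
    intro v hv
    rw [List.mem_map] at hv
    obtain ⟨s, hs, rfl⟩ := hv
    obtain ⟨⟨hx0, hx1, hy0, hy1⟩, hd0, hd1⟩ := h s hs
    rw [Finset.mem_Ico]
    constructor
    · nlinarith
    · have h1 : (s.1.2 + 1) * len_x ≤ len_y * len_x :=
        mul_le_mul_of_nonneg_right (by omega) (by omega)
      nlinarith
  calc l.length = (l.map e).length := by simp
    _ = (l.map e).toFinset.card := (List.toFinset_card_of_nodup hmaps).symm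
    _ ≤ (Finset.Ico (0 : Int) (4 * len_x * len_y)).card := by
        apply Finset.card_le_card
        intro v hv
        rw [List.mem_toFinset] at hv
        exact hbound v hv
    _ = (4 * len_x * len_y).toNat := by rw [Int.card_Ico]; ring_nf

-- once the next state lies in the closed, in-map trajectory T, B never leaves the
-- map and adds no new position: it burns its budget and reports a loop
theorem pvCycle (route_map : List String) (len_x len_y : Int)
    (T : List ((Int × Int) × Int))
    (hT : ∀ t ∈ T, pvStep route_map len_x len_y t ∈ T)
    (hin : ∀ t ∈ T, pvInM len_x len_y t.1) :
    ∀ (b : Nat) (s : (Int × Int) × Int) (seen : PySem.Set (Int × Int)),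
      s ∈ T → seen.Nodup → (∀ p, p ∈ seen ↔ ∃ t ∈ T, t.1 = p) →
      pvLoopB route_map len_x len_y b seen s.1 s.2 = ((seen.length : Int), true) := by
  intro b
  induction b with
  | zero => intro s seen _ _ _; rfl
  | succ b ih =>
    intro s seen hsT hnd hseen
    rw [pvLoopB_succ]
    have hstep : pvStep route_map len_x len_y s ∈ T := hT s hsT
    rw [if_pos (hin _ hstep)]
    have hmem : (pvStep route_map len_x len_y s).1 ∈ seen :=
      (hseen _).mpr ⟨_, hstep, rfl⟩
    rw [PySem.Set.add_of_mem hmem]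
    exact ih _ seen hstep hnd hseen

-- A's one loop iteration, phrased with pvStep
theorem pvLoopA_succ (route_map : List String) (len_x len_y : Int)
    (f : Nat) (states : PySem.Set ((Int × Int) × Int)) (s : (Int × Int) × Int) :
    pvLoopA route_map len_x len_y (f + 1) states s.1 s.2 =
      (if pvIsInMapA s.1 len_x len_y = true then
        (if PySem.Set.contains (PySem.Set.add states s) (pvStep route_map len_x len_y s) = true then
          (pvCountA (PySem.Set.add states s), true)
        else
          pvLoopA route_map len_x len_y f (PySem.Set.add states s)
            (pvStep route_map len_x len_y s).1 (pvStep route_map len_x len_y s).2)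
      else (pvCountA states, false)) := rfl

theorem pvChain_mem {α : Type} (f : α → α) :
    ∀ (l : List α) (x : α), List.IsChain (fun a b => b = f a) l → x ∈ l →
      f x ∈ l ∨ ∃ h : l ≠ [], x = l.getLast h := by
  intro l
  induction l with
  | nil => intro x _ hx; simp at hx
  | cons a t ih =>
    intro x hc hx
    rcases List.mem_cons.mp hx with rfl | hxt
    · cases t with
      | nil => exact Or.inr ⟨by simp, by simp⟩
      | cons b t' =>
        have hb : b = f x := (List.isChain_cons_cons.mp hc).1
        exact Or.inl (by rw [← hb]; simp)
    · rcases ih x hc.tail hxt with hfx | ⟨hne, hlast⟩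
      · exact Or.inl (List.mem_cons_of_mem _ hfx)
      · refine Or.inr ⟨by simp, ?_⟩
        rw [hlast, List.getLast_cons hne]

theorem pvMain (route_map : List String) (len_x len_y : Int) :
    ∀ (b : Nat) (path : List ((Int × Int) × Int)) (cur : (Int × Int) × Int)
      (seen : PySem.Set (Int × Int)),
      List.IsChain (fun s t => t = pvStep route_map len_x len_y s) (path ++ [cur]) →
      (path ++ [cur]).Nodup →
      (∀ s ∈ path ++ [cur], pvInM len_x len_y s.1 ∧ 0 ≤ s.2 ∧ s.2 < 4) →
      seen.Nodup →
      (∀ p, p ∈ seen ↔ ∃ s ∈ path ++ [cur], s.1 = p) →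
      path.length + b = (4 * len_x * len_y).toNat →
      pvLoopA route_map len_x len_y (b + 2) path cur.1 cur.2 =
        pvLoopB route_map len_x len_y b seen cur.1 cur.2 := by
  intro b
  induction b with
  | zero =>
    intro path cur seen _ hnodup hinm _ _ hlen
    exfalso
    have := pvPigeon len_x len_y (path ++ [cur]) hnodup hinm
    simp only [List.length_append, List.length_cons, List.length_nil] at this
    omega
  | succ b ih =>
    intro path cur seen hchain hnodup hinm hsnd hseen hlen
    have hcur_mem : cur ∈ path ++ [cur] := by simp
    have hcur_in : pvInM len_x len_y cur.1 := (hinm cur hcur_mem).1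
    have hcur_bool : pvIsInMapA cur.1 len_x len_y = true := (pvIsInMapA_eq _ _ _).mpr hcur_in
    have hcur_notmem : cur ∉ path := by
      have := (List.nodup_append.mp hnodup).2.2
      intro hc
      exact this cur hc cur (List.mem_singleton_self _) rfl
    show pvLoopA route_map len_x len_y (b + 1 + 2) path cur.1 cur.2 = _
    rw [show b + 1 + 2 = (b + 2) + 1 by omega]
    rw [pvLoopA_succ, if_pos hcur_bool]
    have hadd : PySem.Set.add path cur = path ++ [cur] := PySem.Set.add_of_not_mem hcur_notmem
    rw [hadd]
    set s' := pvStep route_map len_x len_y cur with hs'def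
    clear_value s'
    have hsdir : 0 ≤ s'.2 ∧ s'.2 < 4 := by
      have h4 := hinm cur hcur_mem
      rw [hs'def]
      exact pvDirRange route_map len_x len_y cur.1 4 cur.2 h4.2.1 h4.2.2
    by_cases hmem : s' ∈ path ++ [cur]
    · -- A detects the repeat and stops; B keeps walking inside the cycle
      rw [if_pos ((PySem.Set.contains_iff _ _).mpr hmem)]
      rw [pvLoopB_succ, ← hs'def]
      have hs'in : pvInM len_x len_y s'.1 := (hinm s' hmem).1
      rw [if_pos hs'in]
      have hs1seen : s'.1 ∈ seen := (hseen _).mpr ⟨s', hmem, rfl⟩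
      rw [PySem.Set.add_of_mem hs1seen]
      have hclosed : ∀ t ∈ path ++ [cur], pvStep route_map len_x len_y t ∈ path ++ [cur] := by
        intro t ht
        rcases pvChain_mem (pvStep route_map len_x len_y) _ t hchain ht with h | ⟨hne, hlast⟩
        · exact h
        · have : t = cur := by
            rw [hlast]
            simp
          rw [this, ← hs'def]
          exact hmem
      rw [pvCycle route_map len_x len_y (path ++ [cur]) hclosed
        (fun t ht => (hinm t ht).1) b s' seen hmem hsnd hseen]
      rw [pvCountA_eq (path ++ [cur]) seen hsnd hseen]
    · -- fresh state: both sides take one more step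
      rw [if_neg (fun hc => hmem ((PySem.Set.contains_iff _ _).mp hc))]
      rw [pvLoopB_succ, ← hs'def]
      by_cases hs'in : pvInM len_x len_y s'.1
      · rw [if_pos hs'in]
        have hchain' : List.IsChain (fun s t => t = pvStep route_map len_x len_y s)
            ((path ++ [cur]) ++ [s']) := by
          rw [List.isChain_append]
          refine ⟨hchain, by constructor, ?_⟩
          intro x hx y hy
          simp only [List.head?_cons, Option.mem_some_iff] at hy
          rw [List.getLast?_concat] at hx
          simp only [Option.mem_some_iff] at hx
          subst hx; subst hy; exact hs'def
        have hnodup' : ((path ++ [cur]) ++ [s']).Nodup := by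
          rw [List.nodup_append]
          refine ⟨hnodup, List.nodup_singleton _, ?_⟩
          intro a ha b hb
          rw [List.mem_singleton] at hb
          subst hb
          intro heq
          exact hmem (heq ▸ ha)
        have hinm' : ∀ s ∈ (path ++ [cur]) ++ [s'], pvInM len_x len_y s.1 ∧ 0 ≤ s.2 ∧ s.2 < 4 := by
          intro s hs
          rcases List.mem_append.mp hs with hs | hs
          · exact hinm s hs
          · rw [List.mem_singleton] at hs
            subst hs
            exact ⟨hs'in, hsdir⟩
        have hsnd' : (PySem.Set.add seen s'.1).Nodup := PySem.Set.nodup_add _ _ hsnd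
        have hseen' : ∀ p, p ∈ PySem.Set.add seen s'.1 ↔ ∃ s ∈ (path ++ [cur]) ++ [s'], s.1 = p := by
          intro p
          rw [PySem.Set.mem_add, hseen]
          constructor
          · rintro (⟨s, hsm, rfl⟩ | rfl)
            · exact ⟨s, List.mem_append_left _ hsm, rfl⟩
            · exact ⟨s', List.mem_append_right _ (by simp), rfl⟩
          · rintro ⟨s, hsm, rfl⟩
            rcases List.mem_append.mp hsm with hsm | hsm
            · exact Or.inl ⟨s, hsm, rfl⟩
            · rw [List.mem_singleton] at hsm
              subst hsm
              exact Or.inr rfl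
        have hlen' : (path ++ [cur]).length + b = (4 * len_x * len_y).toNat := by
          simp only [List.length_append, List.length_cons, List.length_nil]
          omega
        exact ih (path ++ [cur]) s' (PySem.Set.add seen s'.1) hchain' hnodup' hinm' hsnd' hseen' hlen'
      · rw [if_neg hs'in]
        -- A walks off the map; its next loop test fails
        rw [show b + 2 = (b + 1) + 1 by omega]
        rw [pvLoopA_succ]
        have hfalse : pvIsInMapA s'.1 len_x len_y = false := by
          cases hx : pvIsInMapA s'.1 len_x len_y
          · rfl
          · exact absurd ((pvIsInMapA_eq _ _ _).mp hx) hs'in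
        rw [if_neg (by simp [hfalse])]
        rw [pvCountA_eq (path ++ [cur]) seen hsnd hseen]

-- a Pre_ guard cell lies in the window and holds '^'
theorem pv_mem_guards (route_map : List String) (len_x len_y : Int) (g : Int × Int)
    (h : g ∈ pvGuardsPre route_map len_x len_y) :
    (0 ≤ g.1 ∧ g.1 < len_x) ∧ (0 ≤ g.2 ∧ g.2 < len_y) ∧ pvAt route_map g.1 g.2 = '^' := by
  unfold pvGuardsPre at h
  rw [List.mem_flatMap] at h
  obtain ⟨ry, hry, hg⟩ := h
  rw [List.mem_filterMap] at hg
  obtain ⟨cx, hcx, hif⟩ := hg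
  by_cases hc : cx.1 = '^'
  · rw [if_pos hc, Option.some_inj] at hif
    obtain ⟨hy0, hy1, hyv⟩ := List.mem_zipIdx (by simpa using hry)
    obtain ⟨hx0, hx1, hxv⟩ := List.mem_zipIdx (by simpa using hcx)
    simp only [Nat.sub_zero] at hyv hxv
    rw [List.length_take] at hy1 hx1
    subst hif
    have hylen : ry.2 < route_map.length := by omega
    refine ⟨⟨by positivity, by simp only; omega⟩, ⟨by positivity, by simp only; omega⟩, ?_⟩
    unfold pvAt
    simp only [Int.toNat_natCast]
    simp only [List.getD_eq_getElem?_getD]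
    rw [List.getElem?_eq_getElem hylen]
    simp only [Option.getD_some]
    have hrow : ry.1 = route_map[ry.2] := by
      rw [hyv]
      exact List.getElem_take
    have hxlen : cx.2 < route_map[ry.2].toList.length := by
      rw [← hrow]; omega
    rw [List.getElem?_eq_getElem hxlen]
    simp only [Option.getD_some]
    have hchar : ry.1.toList[cx.2]'(by omega) = '^' := by
      have ht : (List.take len_x.toNat ry.1.toList)[cx.2]'(by rw [List.length_take]; omega) =
          ry.1.toList[cx.2]'(by omega) := List.getElem_take
      rw [← ht, ← hxv, hc]
    simp only [← hrow]
    exact hchar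
  · rw [if_neg hc] at hif
    cases hif

-- under the indexability part of Pre_, the ports' cell lookup inside the window
-- is exactly pvAt
theorem pvLookup (route_map : List String) (len_x len_y x y : Int)
    (h1 : len_y ≤ (route_map.length : Int))
    (h2 : ∀ s ∈ route_map.take len_y.toNat, len_x ≤ (s.toList.length : Int))
    (hx0 : 0 ≤ x) (hx1 : x < len_x) (hy0 : 0 ≤ y) (hy1 : y < len_y) :
    ((PySem.List.pyGet? route_map y).bind (fun r => PySem.Str.pyGet? r x)) =
      some (pvAt route_map x y) := by
  have hylen : y.toNat < route_map.length := by omega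
  have hrow_mem : route_map[y.toNat] ∈ route_map.take len_y.toNat := by
    have hyy : y.toNat < len_y.toNat := by omega
    have : (route_map.take len_y.toNat)[y.toNat]'(by
        rw [List.length_take]; omega) = route_map[y.toNat] := List.getElem_take
    rw [← this]
    exact List.getElem_mem _
  have hxlen : x.toNat < route_map[y.toNat].toList.length := by
    have := h2 _ hrow_mem
    omega
  have hy' : y = ((y.toNat : Nat) : Int) := by omega
  have hx' : x = ((x.toNat : Nat) : Int) := by omega
  rw [hy', PySem.List.pyGet?_natCast]
  rw [List.getElem?_eq_getElem hylen]
  simp only [Option.bind_some]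
  rw [hx', PySem.Str.pyGet?_natCast]
  rw [List.getElem?_eq_getElem hxlen]
  unfold pvAt
  congr 1
  simp only [Int.toNat_natCast]
  simp only [List.getD_eq_getElem?_getD]
  rw [List.getElem?_eq_getElem hylen]
  simp only [Option.getD_some]
  rw [List.getElem?_eq_getElem hxlen]
  simp

theorem pvScanY_none (route_map : List String) (x : Int) :
    ∀ (f : Nat) (y0 : Int), pvScanYA route_map x f y0 = none →
      ∀ y, y0 ≤ y → y < y0 + f →
        ((PySem.List.pyGet? route_map y).bind (fun r => PySem.Str.pyGet? r x)) ≠ some '^' := by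
  intro f
  induction f with
  | zero => intro y0 _ y hy1 hy2; omega
  | succ f ih =>
    intro y0 hnone y hy1 hy2
    unfold pvScanYA at hnone
    by_cases hc : ((PySem.List.pyGet? route_map y0).bind (fun r => PySem.Str.pyGet? r x)) = some '^'
    · rw [if_pos hc] at hnone; cases hnone
    · rw [if_neg hc] at hnone
      by_cases hy : y = y0
      · subst hy; exact hc
      · exact ih (y0 + 1) hnone y (by omega) (by omega)

theorem pvScanX_none (route_map : List String) (len_y : Int) :
    ∀ (f : Nat) (x0 : Int), pvScanXA route_map len_y f x0 = none →
      ∀ x, x0 ≤ x → x < x0 + f → pvScanYA route_map x len_y.toNat 0 = none := by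
  intro f
  induction f with
  | zero => intro x0 _ x hx1 hx2; omega
  | succ f ih =>
    intro x0 hnone x hx1 hx2
    unfold pvScanXA at hnone
    cases hinner : pvScanYA route_map x0 len_y.toNat 0 with
    | some g => rw [hinner] at hnone; cases hnone
    | none =>
      rw [hinner] at hnone
      by_cases hx : x = x0
      · subst hx; exact hinner
      · exact ih (x0 + 1) hnone x (by omega) (by omega)

theorem pvScanY_some (route_map : List String) (x : Int) :
    ∀ (f : Nat) (y0 : Int) (g : Int × Int), pvScanYA route_map x f y0 = some g →
      g.1 = x ∧ y0 ≤ g.2 ∧ g.2 < y0 + f := by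
  intro f
  induction f with
  | zero => intro y0 g h; cases h
  | succ f ih =>
    intro y0 g h
    unfold pvScanYA at h
    by_cases hc : ((PySem.List.pyGet? route_map y0).bind (fun r => PySem.Str.pyGet? r x)) = some '^'
    · rw [if_pos hc, Option.some_inj] at h
      subst h
      exact ⟨rfl, by omega, by omega⟩
    · rw [if_neg hc] at h
      have := ih (y0 + 1) g h
      exact ⟨this.1, by omega, by omega⟩

theorem pvScanX_some (route_map : List String) (len_y : Int) :
    ∀ (f : Nat) (x0 : Int) (g : Int × Int), pvScanXA route_map len_y f x0 = some g →
      ∃ x, x0 ≤ x ∧ x < x0 + f ∧ pvScanYA route_map x len_y.toNat 0 = some g := by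
  intro f
  induction f with
  | zero => intro x0 g h; cases h
  | succ f ih =>
    intro x0 g h
    unfold pvScanXA at h
    cases hinner : pvScanYA route_map x0 len_y.toNat 0 with
    | some g' =>
      rw [hinner, Option.some_inj] at h
      subst h
      exact ⟨x0, le_refl _, by omega, hinner⟩
    | none =>
      rw [hinner] at h
      obtain ⟨x, hx1, hx2, hx3⟩ := ih (x0 + 1) g h
      exact ⟨x, by omega, by omega, hx3⟩

theorem pvScanY_finds (route_map : List String) (x : Int) :
    ∀ (f : Nat) (y y0 : Int), y ≤ y0 → y0 < y + f →
      ((PySem.List.pyGet? route_map y0).bind (fun r => PySem.Str.pyGet? r x)) = some '^' →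
      (∀ y', y ≤ y' → y' < y0 →
        ((PySem.List.pyGet? route_map y').bind (fun r => PySem.Str.pyGet? r x)) ≠ some '^') →
      pvScanYA route_map x f y = some (x, y0) := by
  intro f
  induction f with
  | zero => intro y y0 h1 h2 _ _; omega
  | succ f ih =>
    intro y y0 h1 h2 hhit hmiss
    unfold pvScanYA
    by_cases hy : y = y0
    · subst hy
      rw [if_pos hhit]
    · rw [if_neg (hmiss y (le_refl _) (by omega))]
      exact ih (y + 1) y0 (by omega) (by omega) hhit
        (fun y' hy1 hy2 => hmiss y' (by omega) hy2)

theorem pvLookup0 (route_map : List String) (y : Int) (hy0 : 0 ≤ y)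
    (hylen : y.toNat < route_map.length)
    (hrow : 1 ≤ route_map[y.toNat].toList.length) :
    ((PySem.List.pyGet? route_map y).bind (fun r => PySem.Str.pyGet? r 0)) =
      some (pvAt route_map 0 y) := by
  have hy' : y = ((y.toNat : Nat) : Int) := by omega
  rw [hy', PySem.List.pyGet?_natCast]
  rw [List.getElem?_eq_getElem hylen]
  simp only [Option.bind_some]
  have h0 : (0 : Int) = ((0 : Nat) : Int) := rfl
  rw [h0, PySem.Str.pyGet?_natCast]
  rw [List.getElem?_eq_getElem (by omega : 0 < route_map[y.toNat].toList.length)]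
  unfold pvAt
  simp only [Int.toNat_natCast]
  simp only [List.getD_eq_getElem?_getD]
  rw [List.getElem?_eq_getElem hylen]
  simp only [Option.getD_some]
  rw [List.getElem?_eq_getElem (by omega : 0 < route_map[y.toNat].toList.length)]
  simp

-- ===== VERDICT (by name: the statement is the Claim_ definition above) =====
theorem calc_path_len_spec : Claim_equal_calc_path_len := by
  intro route_map len_x len_y _ hpre
  have hkey : ∃ g, pvGetGuardPosA route_map len_x len_y = some g ∧ pvInM len_x len_y g := by
    rcases hpre with ⟨h1, h2, g0, hg0w, -, -⟩ | ⟨hlx, n, hn, hnly, hrows, hat, habove⟩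
    · -- (W): the whole window is indexable and holds a guard
      obtain ⟨hgx, hgy, hg0at⟩ := pv_mem_guards route_map len_x len_y g0 hg0w
      have hg0b : (0 ≤ g0.1 ∧ g0.1 < len_x) ∧ (0 ≤ g0.2 ∧ g0.2 < len_y) := ⟨hgx, hgy⟩
      have hsome : ∃ g, pvGetGuardPosA route_map len_x len_y = some g := by
        cases hscan : pvGetGuardPosA route_map len_x len_y with
        | some g => exact ⟨g, rfl⟩
        | none =>
          exfalso
          unfold pvGetGuardPosA at hscan
          have hyn := pvScanX_none route_map len_y len_x.toNat 0 hscan g0.1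
            hg0b.1.1 (by omega)
          have hne := pvScanY_none route_map g0.1 len_y.toNat 0 hyn g0.2
            hg0b.2.1 (by omega)
          rw [pvLookup route_map len_x len_y g0.1 g0.2 h1 h2
            hg0b.1.1 hg0b.1.2 hg0b.2.1 hg0b.2.2, hg0at] at hne
          exact hne rfl
      obtain ⟨g, hg⟩ := hsome
      refine ⟨g, hg, ?_⟩
      have hx := hg
      unfold pvGetGuardPosA at hx
      obtain ⟨x, hx1, hx2, hx3⟩ := pvScanX_some route_map len_y len_x.toNat 0 g hx
      obtain ⟨hgx', hgy1, hgy2⟩ := pvScanY_some route_map x len_y.toNat 0 g hx3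
      exact ⟨by omega, by omega, by omega, by omega⟩
    · -- (P2): the first '^' of column 0 is found and is in the window
      rw [List.mem_range] at hn
      have hfound : pvScanYA route_map 0 len_y.toNat 0 = some (0, (n : Int)) := by
        apply pvScanY_finds route_map 0 len_y.toNat 0 (n : Int) (by omega) (by omega)
        · rw [pvLookup0 route_map (n : Int) (by omega) (by simpa using hn)
            (by
              have := hrows n (List.mem_range.mpr (by omega))
              have hg : route_map.getD n "" = route_map[n] := List.getD_eq_getElem _ _ hn
              rw [hg] at this
              simpa using this)]
          rw [hat]
        · intro y' hy1 hy2
          have hyn : y'.toNat < n := by omega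
          have hylen : y'.toNat < route_map.length := by omega
          rw [pvLookup0 route_map y' hy1 hylen
            (by
              have := hrows y'.toNat (List.mem_range.mpr (by omega))
              have hg : route_map.getD y'.toNat "" = route_map[y'.toNat] :=
                List.getD_eq_getElem _ _ hylen
              rw [hg] at this
              simpa using this)]
          intro heq
          rw [Option.some_inj] at heq
          have := (habove y'.toNat (List.mem_range.mpr hyn)).1
          rw [show ((y'.toNat : Nat) : Int) = y' by omega] at this
          exact this heq
      obtain ⟨k, hk⟩ : ∃ k, len_x.toNat = k + 1 := ⟨len_x.toNat - 1, by omega⟩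
      refine ⟨(0, (n : Int)), ?_, ⟨by omega, by omega, by omega, by omega⟩⟩
      unfold pvGetGuardPosA
      rw [hk]
      unfold pvScanXA
      rw [hfound]
  obtain ⟨g, hg, hgin⟩ := hkey
  unfold Spec_calc_path_len calc_path_len calc_path_len_alt
  rw [← pvGuard_eq, hg]
  have hmain := pvMain route_map len_x len_y (4 * len_x * len_y).toNat [] (g, 0)
    (PySem.Set.add PySem.Set.empty g)
    (by constructor)
    (List.nodup_singleton _)
    (by
      intro s hs
      rw [List.nil_append, List.mem_singleton] at hs
      subst hs
      exact ⟨hgin, le_refl 0, by norm_num⟩)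
    (List.nodup_singleton _)
    (by
      intro p
      show p ∈ [g] ↔ _
      simp [eq_comm])
    (by simp)
  simpa using hmain
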